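-- pv_equiv track=rewrite | github.com/mahajanrahul24/micro_project_health | sound_l.py | sound_levels
-- ===== SOURCE A (Python) =====
-- def sound_levels(sound):
--     """Sound_level function is used to analyse the colum SOUND in the DATASET"""
--     flag = 0
--     for i in sound:
--         if 70 < i < 80:
--             flag = 1
--         if  30 < i < 40:
--             flag = 2
--         if i > 80:
--             flag = 3
--     return flag
-- ===== SOURCE B (Python) =====
-- def _classify(i):
--     if 70 < i < 80:
--         return 1
--     if 30 < i < 40:
--         return 2
--     if i > 80:
--         return 3
--     return 0
--
-- def sound_levels(sound):
--     """Sound_level function is used to analyse the colum SOUND in the DATASET"""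
--     for i in reversed(list(sound)):
--         c = _classify(i)
--         if c != 0:
--             return c
--     return 0
-- ===== Notes on version B (the rewrite author's own statement) =====
-- stated objective: alternative
-- what changed: B factors the range tests into a classify(i) helper and scans the list in reverse, returning the first nonzero classification (early exit) instead of folding a flag over the whole list.
import Mathlib
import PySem

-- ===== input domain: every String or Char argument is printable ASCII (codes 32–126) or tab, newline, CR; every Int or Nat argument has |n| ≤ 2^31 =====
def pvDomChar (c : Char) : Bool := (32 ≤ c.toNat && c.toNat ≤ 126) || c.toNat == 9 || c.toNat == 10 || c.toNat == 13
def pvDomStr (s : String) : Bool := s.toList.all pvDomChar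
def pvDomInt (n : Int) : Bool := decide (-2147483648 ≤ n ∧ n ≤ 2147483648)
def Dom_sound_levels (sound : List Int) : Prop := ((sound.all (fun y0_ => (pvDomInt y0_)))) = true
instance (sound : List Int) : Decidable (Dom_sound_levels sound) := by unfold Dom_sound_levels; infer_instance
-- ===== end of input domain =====

-- B scans the list in reverse with a classify helper and early exit, instead of A's flag fold; alternative decomposition, same cost.

-- ===== PORT A =====
def sound_levels (sound : List Int) : Int :=
  sound.foldl (fun flag i =>
    let flag := if 70 < i ∧ i < 80 then 1 else flag
    let flag := if 30 < i ∧ i < 40 then 2 else flag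
    if i > 80 then 3 else flag) 0

-- ===== PORT B =====
def pvClassify (i : Int) : Int :=
  if 70 < i ∧ i < 80 then 1
  else if 30 < i ∧ i < 40 then 2
  else if i > 80 then 3
  else 0

def pvFirstNonzero : List Int → Int
  | [] => 0
  | i :: rest => let c := pvClassify i; if c ≠ 0 then c else pvFirstNonzero rest

def sound_levels_alt (sound : List Int) : Int :=
  pvFirstNonzero sound.reverse

-- ===== PRECONDITION & SPEC =====
def Spec_sound_levels (sound : List Int) (out : Int) : Prop := out = sound_levels_alt sound
instance (sound : List Int) (out : Int) : Decidable (Spec_sound_levels sound out) := by unfold Spec_sound_levels; infer_instance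

-- ===== CLAIM (what is proved, stated in full; the proofs are below) =====
def Claim_equal_sound_levels : Prop := ∀ (sound : List Int), Dom_sound_levels sound → Spec_sound_levels sound (sound_levels sound)

-- ===== LEMMAS AND PROOFS =====

theorem pvFirstNonzero_append_single (u : List Int) (x : Int) :
    pvFirstNonzero (u ++ [x]) =
      (if pvFirstNonzero u ≠ 0 then pvFirstNonzero u else pvClassify x) := by
  induction u with
  | nil =>
    simp only [List.nil_append, pvFirstNonzero]
    by_cases h : pvClassify x = 0 <;> simp [h]
  | cons a t ih =>
    simp only [List.cons_append, pvFirstNonzero, ih]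
    by_cases h : pvClassify a = 0 <;> simp [h]

theorem sound_levels_fold_eq (l : List Int) (a : Int) :
    l.foldl (fun flag i =>
      let flag := if 70 < i ∧ i < 80 then 1 else flag
      let flag := if 30 < i ∧ i < 40 then 2 else flag
      if i > 80 then 3 else flag) a =
    (if pvFirstNonzero l.reverse ≠ 0 then pvFirstNonzero l.reverse else a) := by
  induction l generalizing a with
  | nil => simp [pvFirstNonzero]
  | cons x t ih =>
    simp only [List.foldl_cons, ih, List.reverse_cons, pvFirstNonzero_append_single]
    by_cases h : pvFirstNonzero t.reverse = 0
    · simp only [h, ne_eq, not_true_eq_false, if_false]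
      unfold pvClassify
      split_ifs <;> simp_all <;> omega
    · simp [h]

-- ===== VERDICT (by name: the statement is the Claim_ definition above) =====
theorem sound_levels_spec : Claim_equal_sound_levels := by
  intro sound _
  unfold Spec_sound_levels sound_levels sound_levels_alt
  rw [sound_levels_fold_eq]
  by_cases h : pvFirstNonzero sound.reverse = 0 <;> simp [h]
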